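-- pv_equiv track=rewrite | github.com/dhanush-urs/repobrain | apps/api/app/services/flow_service.py | _classify_file_role
-- ===== SOURCE A (Python) =====
-- _ROLE_PATTERNS: list[tuple[str, list[str]]] = [
--     ("route_handler",  ["route", "router", "routes", "controller", "handler", "endpoint", "view", "api"]),
--     ("service",        ["service", "services", "usecase", "use_case", "business", "logic", "manager"]),
--     ("repository",     ["repo", "repository", "dao", "store", "storage", "crud", "db", "database", "query"]),
--     ("model",          ["model", "models", "schema", "schemas", "entity", "entities", "orm"]),
--     ("util",           ["util", "utils", "helper", "helpers", "common", "shared", "lib", "libs"]),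
--     ("config",         ["config", "settings", "configuration", "env", "constants"]),
--     ("middleware",     ["middleware", "interceptor", "guard", "auth", "authentication", "authorization"]),
--     ("worker",         ["worker", "task", "job", "queue", "celery", "background", "async"]),
--     ("client",         ["client", "external", "api_client", "http", "request", "fetch"]),
--     ("test",           ["test", "tests", "spec", "specs", "__test__", "fixture"]),
-- ]
--
-- def _classify_file_role(path: str, file_kind: str | None = None) -> str:
--     """Classify a file's architectural role from its path and kind."""
--     path_lower = path.lower()
--     parts = path_lower.replace("\\", "/").split("/")
--     basename = parts[-1].rsplit(".", 1)[0] if "." in parts[-1] else parts[-1]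
--
--     # Check each part of the path against role patterns
--     for role, keywords in _ROLE_PATTERNS:
--         for part in parts + [basename]:
--             for kw in keywords:
--                 if kw == part or part.startswith(kw + "_") or part.endswith("_" + kw):
--                     return role
--                 if kw in part and len(kw) >= 4:
--                     return role
--
--     if file_kind in ("test",):
--         return "test"
--     if file_kind in ("config",):
--         return "config"
--
--     return "unknown"
-- ===== SOURCE B (Python) =====
-- _ROLE_PATTERNS: list[tuple[str, list[str]]] = [
--     ("route_handler",  ["route", "router", "routes", "controller", "handler", "endpoint", "view", "api"]),
--     ("service",        ["service", "services", "usecase", "use_case", "business", "logic", "manager"]),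
--     ("repository",     ["repo", "repository", "dao", "store", "storage", "crud", "db", "database", "query"]),
--     ("model",          ["model", "models", "schema", "schemas", "entity", "entities", "orm"]),
--     ("util",           ["util", "utils", "helper", "helpers", "common", "shared", "lib", "libs"]),
--     ("config",         ["config", "settings", "configuration", "env", "constants"]),
--     ("middleware",     ["middleware", "interceptor", "guard", "auth", "authentication", "authorization"]),
--     ("worker",         ["worker", "task", "job", "queue", "celery", "background", "async"]),
--     ("client",         ["client", "external", "api_client", "http", "request", "fetch"]),
--     ("test",           ["test", "tests", "spec", "specs", "__test__", "fixture"]),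
-- ]
--
--
-- def _kw_matches(kw: str, part: str) -> bool:
--     return (kw == part or part.startswith(kw + "_") or part.endswith("_" + kw)
--             or (kw in part and len(kw) >= 4))
--
--
-- def _classify_file_role(path: str, file_kind: str | None = None) -> str:
--     """Classify a file's architectural role from its path and kind."""
--     path_lower = path.lower()
--     parts = path_lower.replace("\\", "/").split("/")
--     basename = parts[-1].rsplit(".", 1)[0] if "." in parts[-1] else parts[-1]
--
--     # One pass over the segments: collect every role whose keywords hit anything.
--     matched = set()
--     for seg in parts + [basename]:
--         for role, keywords in _ROLE_PATTERNS:
--             if any(_kw_matches(kw, seg) for kw in keywords):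
--                 matched.add(role)
--
--     # Second pass: role-order priority decides.
--     for role, _ in _ROLE_PATTERNS:
--         if role in matched:
--             return role
--
--     if file_kind in ("test",):
--         return "test"
--     if file_kind in ("config",):
--         return "config"
--     return "unknown"
-- ===== Notes on version B (the rewrite author's own statement) =====
-- stated objective: alternative
-- what changed: A's role-major triple loop with early return is replaced by one segment-major pass that collects the set of all matched role names, followed by a scan of _ROLE_PATTERNS returning the first role in that set; the keyword predicate is factored into a helper and role-order priority is preserved by the second pass.
import Mathlib
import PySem

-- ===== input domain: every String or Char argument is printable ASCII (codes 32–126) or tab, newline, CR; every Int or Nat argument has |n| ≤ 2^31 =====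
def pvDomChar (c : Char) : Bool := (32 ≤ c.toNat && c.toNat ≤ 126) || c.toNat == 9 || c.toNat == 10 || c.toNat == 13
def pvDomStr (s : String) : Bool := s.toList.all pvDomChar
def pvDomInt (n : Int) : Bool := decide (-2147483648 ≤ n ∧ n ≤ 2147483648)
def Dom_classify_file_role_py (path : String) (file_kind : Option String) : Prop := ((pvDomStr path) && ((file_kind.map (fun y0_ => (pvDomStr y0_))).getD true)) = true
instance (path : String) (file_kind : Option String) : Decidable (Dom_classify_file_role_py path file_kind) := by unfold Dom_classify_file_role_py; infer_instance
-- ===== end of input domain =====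

-- B replaces A's role-major triple loop with one segment-major pass that collects the set of
-- matched role names, then a scan of _ROLE_PATTERNS picking the first role in that set
-- (alternative decomposition, same exact result).

-- module constant _ROLE_PATTERNS (shared context of both implementations)
def rolePatterns : List (String × List String) := [
  ("route_handler",  ["route", "router", "routes", "controller", "handler", "endpoint", "view", "api"]),
  ("service",        ["service", "services", "usecase", "use_case", "business", "logic", "manager"]),
  ("repository",     ["repo", "repository", "dao", "store", "storage", "crud", "db", "database", "query"]),
  ("model",          ["model", "models", "schema", "schemas", "entity", "entities", "orm"]),
  ("util",           ["util", "utils", "helper", "helpers", "common", "shared", "lib", "libs"]),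
  ("config",         ["config", "settings", "configuration", "env", "constants"]),
  ("middleware",     ["middleware", "interceptor", "guard", "auth", "authentication", "authorization"]),
  ("worker",         ["worker", "task", "job", "queue", "celery", "background", "async"]),
  ("client",         ["client", "external", "api_client", "http", "request", "fetch"]),
  ("test",           ["test", "tests", "spec", "specs", "__test__", "fixture"])]

-- shared prefix of both Pythons: path.lower(), backslash → slash, split, basename without extension
def pySegments (path : String) : List String :=
  let path_lower := PySem.Str.lower path
  let parts := (PySem.Str.split? (PySem.Str.replace path_lower "\\" "/") "/").getD []  -- sep "/" ≠ "": split? is some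
  -- parts[-1]: split always yields a nonempty list, so pyGet? is some; getD "" is never taken
  let lastPart := (PySem.List.pyGet? parts (-1)).getD ""
  -- hand port of parts[-1].rsplit(".", 1)[0] under the guard '"." in parts[-1]':
  -- the text before the LAST dot, i.e. lastPart[:lastPart.rfind(".")] — exact
  let basename := if PySem.Str.isIn "." lastPart
    then PySem.Str.slice lastPart none (some (PySem.Str.rfind lastPart "."))
    else lastPart
  parts ++ [basename]

-- ===== PORT A =====
-- innermost loop: for kw in keywords (the two ifs, in order)
def aLoopKw (role part : String) : List String → Option String
  | [] => none
  | kw :: rest =>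
    if kw == part || PySem.Str.startswith part (kw ++ "_") || PySem.Str.endswith part ("_" ++ kw) then
      some role
    else if PySem.Str.isIn kw part && decide (4 ≤ PySem.Str.len kw) then
      some role
    else aLoopKw role part rest

-- middle loop: for part in parts + [basename]
def aLoopPart (role : String) (kws : List String) : List String → Option String
  | [] => none
  | part :: rest =>
    match aLoopKw role part kws with
    | some r => some r
    | none => aLoopPart role kws rest

-- outer loop: for role, keywords in _ROLE_PATTERNS
def aLoopRole (segs : List String) : List (String × List String) → Option String
  | [] => none
  | (role, kws) :: rest =>
    match aLoopPart role kws segs with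
    | some r => some r
    | none => aLoopRole segs rest

def classify_file_role_py (path : String) (file_kind : Option String) : String :=
  match aLoopRole (pySegments path) rolePatterns with
  | some r => r
  | none =>
    if file_kind == some "test" then "test"
    else if file_kind == some "config" then "config"
    else "unknown"

-- ===== PORT B =====
-- the keyword match predicate (_kw_matches in Source B)
def kwMatch (kw part : String) : Bool :=
  kw == part || PySem.Str.startswith part (kw ++ "_") || PySem.Str.endswith part ("_" ++ kw)
    || (PySem.Str.isIn kw part && decide (4 ≤ PySem.Str.len kw))

-- first pass: one sweep over the segments, collecting the set of matched role names
def bMatched (segs : List String) : PySem.Set String :=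
  segs.foldl (fun acc seg =>
    rolePatterns.foldl (fun acc e =>
      if e.2.any (fun kw => kwMatch kw seg) then PySem.Set.add acc e.1 else acc) acc)
    PySem.Set.empty

-- second pass: first role (in _ROLE_PATTERNS order) that is in the matched set
def bPick (m : PySem.Set String) : List (String × List String) → Option String
  | [] => none
  | e :: rest => if PySem.Set.contains m e.1 then some e.1 else bPick m rest

def classify_file_role_py_alt (path : String) (file_kind : Option String) : String :=
  let segs := pySegments path
  let matched := bMatched segs
  match bPick matched rolePatterns with
  | some r => r
  | none =>
    if file_kind == some "test" then "test"
    else if file_kind == some "config" then "config"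
    else "unknown"

-- ===== PRECONDITION & SPEC =====
def Spec_classify_file_role_py (path : String) (file_kind : Option String) (out : String) : Prop := out = classify_file_role_py_alt path file_kind
instance (path : String) (file_kind : Option String) (out : String) : Decidable (Spec_classify_file_role_py path file_kind out) := by unfold Spec_classify_file_role_py; infer_instance

-- ===== CLAIM (what is proved, stated in full; the proofs are below) =====
def Claim_equal_classify_file_role_py : Prop := ∀ (path : String) (file_kind : Option String), Dom_classify_file_role_py path file_kind → Spec_classify_file_role_py path file_kind (classify_file_role_py path file_kind)

-- ===== LEMMAS AND PROOFS =====

-- does role entry e match any of the segments?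
def roleHit (segs : List String) (e : String × List String) : Bool :=
  segs.any (fun p => e.2.any (fun kw => kwMatch kw p))

theorem aLoopKw_eq (role part : String) (kws : List String) :
    aLoopKw role part kws = if kws.any (fun kw => kwMatch kw part) then some role else none := by
  induction kws with
  | nil => simp [aLoopKw]
  | cons kw rest ih =>
    simp only [aLoopKw, ih, List.any_cons, kwMatch]
    by_cases h1 : (kw == part || PySem.Str.startswith part (kw ++ "_")
        || PySem.Str.endswith part ("_" ++ kw)) = true
    · simp only [h1]; simp
    · have h1' : (kw == part || PySem.Str.startswith part (kw ++ "_")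
          || PySem.Str.endswith part ("_" ++ kw)) = false := by simpa using h1
      simp only [h1']
      by_cases h2 : (PySem.Str.isIn kw part && decide (4 ≤ PySem.Str.len kw)) = true
      · simp only [h2]; simp
      · have h2' : (PySem.Str.isIn kw part && decide (4 ≤ PySem.Str.len kw)) = false := by
          simpa using h2
        simp only [h2']; simp

theorem aLoopPart_eq (role : String) (kws : List String) (segs : List String) :
    aLoopPart role kws segs
      = if segs.any (fun p => kws.any (fun kw => kwMatch kw p)) then some role else none := by
  induction segs with
  | nil => simp [aLoopPart]
  | cons p rest ih =>
    simp only [aLoopPart, aLoopKw_eq, ih, List.any_cons]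
    by_cases h : (kws.any fun kw => kwMatch kw p) = true
    · simp only [h]; simp
    · have h' : (kws.any fun kw => kwMatch kw p) = false := by simpa using h
      simp only [h']; simp

theorem aLoopRole_eq (segs : List String) (pats : List (String × List String)) :
    aLoopRole segs pats = (pats.find? (roleHit segs)).map Prod.fst := by
  induction pats with
  | nil => simp [aLoopRole]
  | cons e rest ih =>
    obtain ⟨role, kws⟩ := e
    simp only [aLoopRole, aLoopPart_eq, ih]
    cases h : roleHit segs (role, kws) with
    | true =>
      rw [List.find?_cons_of_pos h]
      simp only [roleHit] at h
      simp [h]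
    | false =>
      rw [List.find?_cons_of_neg (by simp [h])]
      simp only [roleHit] at h
      simp [h]

-- membership in the set built by B's inner fold (over the role table), for one segment
theorem mem_inner_fold (seg : String) (r : String) (pats : List (String × List String))
    (acc : PySem.Set String) :
    r ∈ pats.foldl (fun acc e =>
        if e.2.any (fun kw => kwMatch kw seg) then PySem.Set.add acc e.1 else acc) acc
      ↔ r ∈ acc ∨ ∃ e ∈ pats, e.1 = r ∧ (e.2.any (fun kw => kwMatch kw seg)) = true := by
  induction pats generalizing acc with
  | nil => simp
  | cons e rest ih =>
    cases h : (e.2.any fun kw => kwMatch kw seg) with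
    | true =>
      simp only [List.foldl_cons, h, if_pos]
      rw [ih]
      constructor
      · rintro (hm | hrest)
        · rcases (PySem.Set.mem_add acc e.1 r).mp hm with hm | hm
          · exact Or.inl hm
          · exact Or.inr ⟨e, List.mem_cons_self, hm.symm, h⟩
        · rcases hrest with ⟨e', he', hn, hh⟩
          exact Or.inr ⟨e', List.mem_cons_of_mem _ he', hn, hh⟩
      · rintro (hm | ⟨e', he', hn, hh⟩)
        · exact Or.inl ((PySem.Set.mem_add acc e.1 r).mpr (Or.inl hm))
        · rcases List.mem_cons.mp he' with h' | h'
          · exact Or.inl ((PySem.Set.mem_add acc e.1 r).mpr (Or.inr (h' ▸ hn.symm)))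
          · exact Or.inr ⟨e', h', hn, hh⟩
    | false =>
      simp only [List.foldl_cons, h, Bool.false_eq_true, if_false]
      rw [ih]
      constructor
      · rintro (hm | ⟨e', he', hn, hh⟩)
        · exact Or.inl hm
        · exact Or.inr ⟨e', List.mem_cons_of_mem _ he', hn, hh⟩
      · rintro (hm | ⟨e', he', hn, hh⟩)
        · exact Or.inl hm
        · rcases List.mem_cons.mp he' with h' | h'
          · exact absurd (h' ▸ hh) (by simp [h])
          · exact Or.inr ⟨e', h', hn, hh⟩

-- membership in B's matched set
theorem mem_bMatched (segs : List String) (r : String) :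
    r ∈ bMatched segs ↔ ∃ e ∈ rolePatterns, e.1 = r ∧ roleHit segs e = true := by
  unfold bMatched
  have main : ∀ (ss : List String) (acc : PySem.Set String),
      r ∈ ss.foldl (fun acc seg =>
          rolePatterns.foldl (fun acc e =>
            if e.2.any (fun kw => kwMatch kw seg) then PySem.Set.add acc e.1 else acc) acc) acc
        ↔ r ∈ acc ∨ ∃ seg ∈ ss, ∃ e ∈ rolePatterns, e.1 = r ∧
            (e.2.any (fun kw => kwMatch kw seg)) = true := by
    intro ss
    induction ss with
    | nil => simp
    | cons seg rest ih =>
      intro acc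
      simp only [List.foldl_cons]
      rw [ih, mem_inner_fold]
      constructor
      · rintro ((hm | ⟨e, he, hn, hh⟩) | ⟨sg, hsg, e, he, hn, hh⟩)
        · exact Or.inl hm
        · exact Or.inr ⟨seg, List.mem_cons_self, e, he, hn, hh⟩
        · exact Or.inr ⟨sg, List.mem_cons_of_mem _ hsg, e, he, hn, hh⟩
      · rintro (hm | ⟨sg, hsg, e, he, hn, hh⟩)
        · exact Or.inl (Or.inl hm)
        · rcases List.mem_cons.mp hsg with h' | h'
          · exact Or.inl (Or.inr ⟨e, he, hn, h' ▸ hh⟩)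
          · exact Or.inr ⟨sg, h', e, he, hn, hh⟩
  rw [main]
  simp only [PySem.Set.empty, List.not_mem_nil, false_or, roleHit, List.any_eq_true]
  constructor
  · rintro ⟨sg, hsg, e, he, hn, kw, hkw, hm⟩
    exact ⟨e, he, hn, sg, hsg, kw, hkw, hm⟩
  · rintro ⟨e, he, hn, sg, hsg, kw, hkw, hm⟩
    exact ⟨sg, hsg, e, he, hn, kw, hkw, hm⟩

-- B's pick over a table with distinct role names, against a set that contains exactly
-- the names of the hit entries, is find?-by-roleHit
theorem bPick_eq_find (segs : List String) :
    ∀ (pats : List (String × List String)) (m : PySem.Set String),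
      (∀ e ∈ pats, (e.1 ∈ m ↔ ∃ e' ∈ pats, e'.1 = e.1 ∧ roleHit segs e' = true)) →
      (pats.map Prod.fst).Nodup →
      bPick m pats = (pats.find? (roleHit segs)).map Prod.fst := by
  intro pats
  induction pats with
  | nil => intro m _ _; simp [bPick]
  | cons e rest ih =>
    intro m hm hnd
    have hne : ∀ e' ∈ rest, e'.1 ≠ e.1 := by
      intro e' he' heq
      exact (List.nodup_cons.mp hnd).1 (heq ▸ List.mem_map_of_mem he')
    have hhead : e.1 ∈ m ↔ roleHit segs e = true := by
      rw [hm e List.mem_cons_self]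
      constructor
      · rintro ⟨e', he', hname, hhit⟩
        rcases List.mem_cons.mp he' with h | h
        · exact h ▸ hhit
        · exact absurd hname (hne e' h)
      · intro h; exact ⟨e, List.mem_cons_self, rfl, h⟩
    cases h : roleHit segs e with
    | true =>
      have hc : PySem.Set.contains m e.1 = true :=
        (PySem.Set.contains_iff m e.1).mpr (hhead.mpr h)
      rw [bPick, hc, List.find?_cons_of_pos h]
      simp
    | false =>
      have hc : PySem.Set.contains m e.1 = false := by
        rw [Bool.eq_false_iff]
        intro hcon
        rw [hhead.mp ((PySem.Set.contains_iff m e.1).mp hcon)] at h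
        exact Bool.noConfusion h
      have hrest : ∀ e'' ∈ rest,
          (e''.1 ∈ m ↔ ∃ e' ∈ rest, e'.1 = e''.1 ∧ roleHit segs e' = true) := by
        intro e'' he''
        rw [hm e'' (List.mem_cons_of_mem _ he'')]
        constructor
        · rintro ⟨e', he', hname, hhit⟩
          rcases List.mem_cons.mp he' with h' | h'
          · exact absurd (by rw [← hname, h']) (hne e'' he'')
          · exact ⟨e', h', hname, hhit⟩
        · rintro ⟨e', he', hname, hhit⟩
          exact ⟨e', List.mem_cons_of_mem _ he', hname, hhit⟩
      rw [bPick, hc, List.find?_cons_of_neg (by simp [h])]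
      simp only [Bool.false_eq_true, if_false]
      exact ih m hrest (List.nodup_cons.mp hnd).2

-- the two scans agree on every segment list
theorem core_eq (segs : List String) :
    aLoopRole segs rolePatterns = bPick (bMatched segs) rolePatterns := by
  rw [aLoopRole_eq, bPick_eq_find segs rolePatterns (bMatched segs)
    (fun e _ => mem_bMatched segs e.1) (by decide)]

-- ===== VERDICT (by name: the statement is the Claim_ definition above) =====
theorem classify_file_role_py_spec : Claim_equal_classify_file_role_py := by
  intro path file_kind _
  unfold Spec_classify_file_role_py classify_file_role_py classify_file_role_py_alt
  rw [core_eq]
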